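-- pv_equiv track=rewrite | github.com/Jihoon-Han22/Large-scale_datamodule_IPTNet | code/tvsum/loc_train-di.py | pad_char_sequences
-- ===== SOURCE A (Python) =====
-- def pad_sequences(sequences, pad_tok=None, max_length=None):
--     if pad_tok is None:
--         pad_tok = 0
--     if max_length is None:
--         max_length = max([len(seq) for seq in sequences])
--     sequence_padded, sequence_length = [], []
--     for seq in sequences:
--         seq_ = seq[:max_length] + [pad_tok] * max(max_length - len(seq), 0)
--         sequence_padded.append(seq_)
--         sequence_length.append(min(len(seq), max_length))
--     return sequence_padded, sequence_length
--
-- def pad_char_sequences(sequences, words_max_length=None, char_max_length=None):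
--     sequence_padded, sequence_length = [], []
--     if words_max_length is None:
--         words_max_length = max(map(lambda x: len(x), sequences))
--     if char_max_length is None:
--         char_max_length = max([max(map(lambda x: len(x), seq)) for seq in sequences])
--     for seq in sequences:
--         sp, sl = pad_sequences(seq, max_length=char_max_length)
--         sequence_padded.append(sp)
--         sequence_length.append(sl)
--     sequence_padded, _ = pad_sequences(sequence_padded, pad_tok=[0] * char_max_length, max_length=words_max_length)
--     sequence_length, _ = pad_sequences(sequence_length, max_length=words_max_length)
--     return sequence_padded, sequence_length
-- ===== SOURCE B (Python) =====
-- def pad_char_sequences(sequences, words_max_length=None, char_max_length=None):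
--     if words_max_length is None:
--         words_max_length = max(len(seq) for seq in sequences)
--     if char_max_length is None:
--         char_max_length = max(max(len(w) for w in seq) for seq in sequences)
--     padded, lengths = [], []
--     for seq in sequences:
--         rows = [w[:char_max_length] + [0] * (char_max_length - len(w)) for w in seq]
--         lens = [min(len(w), char_max_length) for w in seq]
--         extra = max(words_max_length - len(seq), 0)
--         padded.append(rows[:words_max_length] + [[0] * char_max_length for _ in range(extra)])
--         lengths.append(lens[:words_max_length] + [0] * extra)
--     return padded, lengths
-- ===== Notes on version B (the rewrite author's own statement) =====
-- stated objective: simpler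
-- what changed: Replaced the three nested pad_sequences calls (build intermediate per-word padded lists, then re-pad the outer lists twice) by a single pass over sequences that builds each char-padded row, its lengths, and the outer word padding directly.
import Mathlib
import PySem

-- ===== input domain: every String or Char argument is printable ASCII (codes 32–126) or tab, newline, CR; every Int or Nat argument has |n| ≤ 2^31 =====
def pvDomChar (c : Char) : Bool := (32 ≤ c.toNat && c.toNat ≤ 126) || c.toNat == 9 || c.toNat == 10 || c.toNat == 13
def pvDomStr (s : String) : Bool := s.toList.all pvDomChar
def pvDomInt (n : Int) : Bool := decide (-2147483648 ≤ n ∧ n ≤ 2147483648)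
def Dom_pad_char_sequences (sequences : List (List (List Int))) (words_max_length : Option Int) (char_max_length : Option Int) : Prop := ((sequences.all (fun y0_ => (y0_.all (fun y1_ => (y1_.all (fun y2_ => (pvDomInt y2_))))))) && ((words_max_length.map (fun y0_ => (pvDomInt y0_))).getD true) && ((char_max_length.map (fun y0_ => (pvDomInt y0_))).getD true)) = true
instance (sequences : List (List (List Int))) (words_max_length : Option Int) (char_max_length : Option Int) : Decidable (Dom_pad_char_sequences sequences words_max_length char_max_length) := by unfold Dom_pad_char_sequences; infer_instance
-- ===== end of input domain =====

-- B builds the padded rows and lengths in one direct pass instead of three nested pad_sequences calls (simpler decomposition; return-value equivalence).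


-- ===== PORT A =====
-- pad_sequences with pad_tok and max_length both resolved (every call site in A resolves them
-- before the loop); seq[:max_length] is PySem.List.slice, [pad_tok]*max(m-len,0) is replicate.
def padSeqA {α : Type} (sequences : List (List α)) (pad_tok : α) (max_length : Int) : List (List α) × List Int :=
  sequences.foldl (fun acc seq =>
    (acc.1 ++ [PySem.List.slice seq none (some max_length) ++
               List.replicate (max (max_length - (seq.length : Int)) 0).toNat pad_tok],
     acc.2 ++ [min (seq.length : Int) max_length])) ([], [])

def pad_char_sequences (sequences : List (List (List Int))) (words_max_length : Option Int) (char_max_length : Option Int) : List (List (List Int)) × List (List Int) :=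
  -- max(map(len, sequences)) / max([max(map(len, seq)) for seq in sequences]); ValueError (max of
  -- empty) becomes none, excluded by Pre_.
  let wmlO : Option Int := match words_max_length with
    | some w => some w
    | none => PySem.List.max? (sequences.map (fun x => (x.length : Int))) (fun y => y)
  let cmlO : Option Int := match char_max_length with
    | some c => some c
    | none =>
      match sequences.mapM (fun seq => PySem.List.max? (seq.map (fun w => (w.length : Int))) (fun y => y)) with
      | none => none
      | some ms => PySem.List.max? ms (fun y => y)
  match wmlO, cmlO with
  | some wml, some cml =>
    let inner := sequences.foldl (fun acc seq =>
      let r := padSeqA seq (0 : Int) cml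
      (acc.1 ++ [r.1], acc.2 ++ [r.2])) ([], [])
    -- [0]*char_max_length: replicate cml.toNat (Python's [0]*n is [] for n ≤ 0, as is toNat)
    let sp := (padSeqA inner.1 (List.replicate cml.toNat (0 : Int)) wml).1
    let sl := (padSeqA inner.2 (0 : Int) wml).1
    (sp, sl)
  | _, _ => ([], [])   -- unreachable under Pre_ (Python raises ValueError)

-- ===== PORT B =====
def pad_char_sequences_alt (sequences : List (List (List Int))) (words_max_length : Option Int) (char_max_length : Option Int) : List (List (List Int)) × List (List Int) :=
  -- 'if words_max_length is None: words_max_length = max(...)' as Option.orElse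
  let wmlO : Option Int := words_max_length.orElse
    (fun _ => PySem.List.max? (sequences.map (fun s : List (List Int) => (s.length : Int))) (fun y => y))
  let cmlO : Option Int := char_max_length.orElse
    (fun _ => (sequences.mapM (fun seq : List (List Int) => PySem.List.max? (seq.map (fun w : List Int => (w.length : Int))) (fun y => y))).bind
              (fun ms => PySem.List.max? ms (fun y => y)))
  -- a none (Python: ValueError) is excluded by Pre_; ([], []) is the totalizing default
  (wmlO.bind (fun wml => cmlO.map (fun cml =>
    sequences.foldl (fun acc seq =>
      -- rows = [w[:cml] + [0]*(cml-len(w)) for w in seq]  ([0]*n is [] for n ≤ 0, as is toNat)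
      let rows := seq.map (fun w => PySem.List.slice w none (some cml) ++
                                    List.replicate (cml - (w.length : Int)).toNat (0 : Int))
      let lens := seq.map (fun w => min (w.length : Int) cml)
      let extra := (max (wml - (seq.length : Int)) 0).toNat
      (acc.1 ++ [PySem.List.slice rows none (some wml) ++
                 List.replicate extra (List.replicate cml.toNat (0 : Int))],
       acc.2 ++ [PySem.List.slice lens none (some wml) ++ List.replicate extra (0 : Int)])) ([], [])))).getD ([], [])

-- ===== PRECONDITION & SPEC =====
-- Pre_ excludes exactly the inputs where Python A raises ValueError: a missing words_max_length
-- with no sequences, or a missing char_max_length with no sequences or an empty inner sequence.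
def Pre_pad_char_sequences (sequences : List (List (List Int))) (words_max_length : Option Int) (char_max_length : Option Int) : Prop :=
  (words_max_length = none → sequences ≠ []) ∧
  (char_max_length = none → sequences ≠ [] ∧ ∀ s ∈ sequences, s ≠ [])
instance (sequences : List (List (List Int))) (words_max_length : Option Int) (char_max_length : Option Int) : Decidable (Pre_pad_char_sequences sequences words_max_length char_max_length) := by unfold Pre_pad_char_sequences; infer_instance

def pvWitness_pad_char_sequences : List (List (List Int)) × Option Int × Option Int :=
  ([[[1], [2, 3]], [[4]]], none, none)

def Spec_pad_char_sequences (sequences : List (List (List Int))) (words_max_length : Option Int) (char_max_length : Option Int) (out : List (List (List Int)) × List (List Int)) : Prop := out = pad_char_sequences_alt sequences words_max_length char_max_length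
instance (sequences : List (List (List Int))) (words_max_length : Option Int) (char_max_length : Option Int) (out : List (List (List Int)) × List (List Int)) : Decidable (Spec_pad_char_sequences sequences words_max_length char_max_length out) := by unfold Spec_pad_char_sequences; infer_instance

-- ===== CLAIM (what is proved, stated in full; the proofs are below) =====
def Claim_equal_pad_char_sequences : Prop := ∀ (sequences : List (List (List Int))) (words_max_length : Option Int) (char_max_length : Option Int), Dom_pad_char_sequences sequences words_max_length char_max_length → Pre_pad_char_sequences sequences words_max_length char_max_length → Spec_pad_char_sequences sequences words_max_length char_max_length (pad_char_sequences sequences words_max_length char_max_length)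

-- ===== LEMMAS AND PROOFS =====

-- appending a pair of singletons in a foldl is a pair of maps
theorem foldl_pair_singleton {α β γ : Type} (l : List α) (f : α → β) (g : α → γ)
    (a : List β) (b : List γ) :
    l.foldl (fun acc x => (acc.1 ++ [f x], acc.2 ++ [g x])) (a, b) = (a ++ l.map f, b ++ l.map g) := by
  induction l generalizing a b with
  | nil => simp
  | cons h t ih => simp [List.foldl_cons, ih]

theorem padSeqA_eq {α : Type} (sequences : List (List α)) (pad_tok : α) (max_length : Int) :
    padSeqA sequences pad_tok max_length =
      (sequences.map (fun seq => PySem.List.slice seq none (some max_length) ++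
          List.replicate (max (max_length - (seq.length : Int)) 0).toNat pad_tok),
       sequences.map (fun seq => min (seq.length : Int) max_length)) := by
  unfold padSeqA
  simpa using foldl_pair_singleton sequences _ _ [] []

theorem toNat_max_zero (a : Int) : (max a 0).toNat = a.toNat := by omega

theorem mapM_option_eq_none_iff {a b : Type} (f : a -> Option b) (l : List a) :
    l.mapM f = none ↔ ∃ x ∈ l, f x = none := by
  induction l with
  | nil => simp [List.mapM_nil]
  | cons h t ih =>
    simp only [List.mapM_cons]
    cases hf : f h <;> cases ht : t.mapM f <;> simp_all [Option.bind]

theorem mapM_option_eq_some_nil {a b : Type} (f : a -> Option b) (l : List a)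
    (h : l.mapM f = some []) : l = [] := by
  cases l with
  | nil => rfl
  | cons x t =>
    simp only [List.mapM_cons] at h
    cases hf : f x <;> cases ht : t.mapM f <;> simp_all [Option.bind]

theorem pad_core (seqs : List (List (List Int))) (wml cml : Int) :
    (let inner := seqs.foldl (fun acc seq =>
        let r := padSeqA seq (0 : Int) cml
        (acc.1 ++ [r.1], acc.2 ++ [r.2])) (([], []) : List (List (List Int)) × List (List Int))
     ((padSeqA inner.1 (List.replicate cml.toNat (0 : Int)) wml).1,
      (padSeqA inner.2 (0 : Int) wml).1))
    = seqs.foldl (fun acc seq =>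
        let rows := seq.map (fun w => PySem.List.slice w none (some cml) ++
                                    List.replicate (cml - (w.length : Int)).toNat (0 : Int))
        let lens := seq.map (fun w => min (w.length : Int) cml)
        let extra := (max (wml - (seq.length : Int)) 0).toNat
        (acc.1 ++ [PySem.List.slice rows none (some wml) ++
                 List.replicate extra (List.replicate cml.toNat (0 : Int))],
         acc.2 ++ [PySem.List.slice lens none (some wml) ++ List.replicate extra (0 : Int)]))
        (([], []) : List (List (List Int)) × List (List Int)) := by
  simp only [foldl_pair_singleton, List.nil_append, padSeqA_eq, List.map_map, Function.comp_def,
    List.length_map, toNat_max_zero]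

-- ===== VERDICT (by name: the statement is the Claim_ definition above) =====

theorem pad_char_sequences_spec : Claim_equal_pad_char_sequences := by
  intro sequences words_max_length char_max_length _hDom hPre
  obtain ⟨hW, hC⟩ := hPre
  unfold Spec_pad_char_sequences pad_char_sequences pad_char_sequences_alt
  rcases words_max_length with _ | w
  · rcases hmw : PySem.List.max? (sequences.map (fun x : List (List Int) => (x.length : Int))) (fun y => y) with _ | wv
    · exact absurd (List.map_eq_nil_iff.mp ((PySem.List.max?_eq_none_iff _ _).mp hmw)) (hW rfl)
    · rcases char_max_length with _ | c
      · obtain ⟨hne, hall⟩ := hC rfl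
        rcases hm : sequences.mapM (fun seq : List (List Int) => PySem.List.max? (seq.map (fun w : List Int => (w.length : Int))) (fun y => y)) with _ | ms
        · obtain ⟨s, hs, hnone⟩ := (mapM_option_eq_none_iff _ _).mp hm
          exact absurd (List.map_eq_nil_iff.mp ((PySem.List.max?_eq_none_iff _ _).mp hnone)) (hall s hs)
        · dsimp only [Option.orElse, Option.bind, Option.map, Option.getD]
          rcases hmx : PySem.List.max? ms (fun y : Int => y) with _ | cv
          · have : ms = [] := (PySem.List.max?_eq_none_iff _ _).mp hmx
            subst this
            exact absurd (mapM_option_eq_some_nil _ _ hm) hne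
          · dsimp only [Option.orElse, Option.bind, Option.map, Option.getD]
            exact pad_core sequences wv cv
      · dsimp only [Option.orElse, Option.bind, Option.map, Option.getD]
        exact pad_core sequences wv c
  · rcases char_max_length with _ | c
    · obtain ⟨hne, hall⟩ := hC rfl
      rcases hm : sequences.mapM (fun seq : List (List Int) => PySem.List.max? (seq.map (fun w : List Int => (w.length : Int))) (fun y => y)) with _ | ms
      · obtain ⟨s, hs, hnone⟩ := (mapM_option_eq_none_iff _ _).mp hm
        exact absurd (List.map_eq_nil_iff.mp ((PySem.List.max?_eq_none_iff _ _).mp hnone)) (hall s hs)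
      · dsimp only [Option.orElse, Option.bind, Option.map, Option.getD]
        rcases hmx : PySem.List.max? ms (fun y : Int => y) with _ | cv
        · have : ms = [] := (PySem.List.max?_eq_none_iff _ _).mp hmx
          subst this
          exact absurd (mapM_option_eq_some_nil _ _ hm) hne
        · dsimp only [Option.orElse, Option.bind, Option.map, Option.getD]
          exact pad_core sequences w cv
    · dsimp only [Option.orElse, Option.bind, Option.map, Option.getD]
      exact pad_core sequences w c
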